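-- pv_equiv track=rewrite | github.com/javlintor/bakery_management | manolibakes/core/services/orders.py | _sum_bread_totals
-- ===== SOURCE A (Python) =====
-- def _sum_bread_totals(
--     orders_map: dict[tuple[int, int], int],
--     daily_defaults_map: dict[tuple[int, int], int],
-- ) -> dict[int, int]:
--     all_pairs = set(orders_map.keys()) | set(daily_defaults_map.keys())
--     bread_totals: dict[int, int] = {}
--     for customer_id, bread_id in all_pairs:
--         default_number = daily_defaults_map.get((customer_id, bread_id), 0)
--         resolved_number = orders_map.get((customer_id, bread_id), default_number)
--         bread_totals[bread_id] = bread_totals.get(bread_id, 0) + resolved_number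
--     return bread_totals
-- ===== SOURCE B (Python) =====
-- def _sum_bread_totals(
--     orders_map: dict[tuple[int, int], int],
--     daily_defaults_map: dict[tuple[int, int], int],
-- ) -> dict[int, int]:
--     bread_totals: dict[int, int] = {}
--     for (customer_id, bread_id), number in orders_map.items():
--         bread_totals[bread_id] = bread_totals.get(bread_id, 0) + number
--     for (customer_id, bread_id), number in daily_defaults_map.items():
--         if (customer_id, bread_id) not in orders_map:
--             bread_totals[bread_id] = bread_totals.get(bread_id, 0) + number
--     return bread_totals
-- ===== Notes on version B (the rewrite author's own statement) =====
-- stated objective: simpler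
-- what changed: Drops the union-set construction and the per-pair double dict lookups: one pass over orders_map adding each quantity, then one pass over daily_defaults_map adding only the defaults whose (customer, bread) pair is not overridden by an order.
import Mathlib
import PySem

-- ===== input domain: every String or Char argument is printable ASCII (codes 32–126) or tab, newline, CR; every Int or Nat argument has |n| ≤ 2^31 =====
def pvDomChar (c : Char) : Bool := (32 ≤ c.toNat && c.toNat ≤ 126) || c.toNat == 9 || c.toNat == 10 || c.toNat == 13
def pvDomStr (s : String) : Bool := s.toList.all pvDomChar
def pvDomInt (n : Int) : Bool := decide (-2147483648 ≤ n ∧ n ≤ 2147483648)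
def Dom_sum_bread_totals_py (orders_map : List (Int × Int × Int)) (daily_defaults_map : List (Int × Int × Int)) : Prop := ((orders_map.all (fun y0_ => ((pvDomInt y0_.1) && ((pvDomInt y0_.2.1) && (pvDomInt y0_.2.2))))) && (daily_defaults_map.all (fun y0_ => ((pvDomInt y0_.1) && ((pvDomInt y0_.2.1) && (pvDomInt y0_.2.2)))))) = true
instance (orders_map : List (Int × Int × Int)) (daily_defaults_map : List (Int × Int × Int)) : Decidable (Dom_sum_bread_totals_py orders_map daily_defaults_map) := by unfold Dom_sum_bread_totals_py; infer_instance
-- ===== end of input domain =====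

-- B replaces A's union-set-plus-resolve pass by two direct passes (orders, then non-overridden
-- defaults); objective: simpler. Equality is about the returned dict's contents (Python dict
-- outputs are compared ignoring order).

-- ===== PORT A =====
def sum_bread_totals_py (orders_map : List (Int × Int × Int)) (daily_defaults_map : List (Int × Int × Int)) : List (Int × Int) :=
  let om : PySem.Dict (Int × Int) Int := PySem.Dict.ofList (orders_map.map (fun t => ((t.1, t.2.1), t.2.2)))
  let dm : PySem.Dict (Int × Int) Int := PySem.Dict.ofList (daily_defaults_map.map (fun t => ((t.1, t.2.1), t.2.2)))
  let all_pairs : PySem.Set (Int × Int) := PySem.Set.union (PySem.Set.ofList om.keys) dm.keys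
  let bread_totals : PySem.Dict Int Int := all_pairs.foldl (fun bt p =>
    let default_number := dm.getD p 0
    let resolved_number := om.getD p default_number
    bt.insert p.2 (bt.getD p.2 0 + resolved_number)) PySem.Dict.empty
  bread_totals.items

-- ===== PORT B =====
def sum_bread_totals_py_alt (orders_map : List (Int × Int × Int)) (daily_defaults_map : List (Int × Int × Int)) : List (Int × Int) :=
  let bt1 : PySem.Dict Int Int := orders_map.foldl
    (fun bt t => bt.insert t.2.1 (bt.getD t.2.1 0 + t.2.2)) PySem.Dict.empty
  let bt2 : PySem.Dict Int Int := daily_defaults_map.foldl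
    (fun bt t =>
      if orders_map.any (fun o => o.1 == t.1 && o.2.1 == t.2.1) then bt
      else bt.insert t.2.1 (bt.getD t.2.1 0 + t.2.2)) bt1
  bt2.items

-- ===== PRECONDITION & SPEC =====
-- Pre_ only states dict well-formedness: the association lists stand for Python dicts, whose
-- keys (customer_id, bread_id) are necessarily unique; it excludes no input a Python caller can form.
def Pre_sum_bread_totals_py (orders_map : List (Int × Int × Int)) (daily_defaults_map : List (Int × Int × Int)) : Prop :=
  (orders_map.map (fun t => (t.1, t.2.1))).Nodup ∧ (daily_defaults_map.map (fun t => (t.1, t.2.1))).Nodup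
instance (orders_map : List (Int × Int × Int)) (daily_defaults_map : List (Int × Int × Int)) : Decidable (Pre_sum_bread_totals_py orders_map daily_defaults_map) := by unfold Pre_sum_bread_totals_py; infer_instance
def pvWitness_sum_bread_totals_py : (List (Int × Int × Int)) × (List (Int × Int × Int)) :=
  ([(1, 2, 3), (1, 4, 1)], [(1, 2, 9), (5, 2, 2)])
def Spec_sum_bread_totals_py (orders_map : List (Int × Int × Int)) (daily_defaults_map : List (Int × Int × Int)) (out : List (Int × Int)) : Prop := out = sum_bread_totals_py_alt orders_map daily_defaults_map
instance (orders_map : List (Int × Int × Int)) (daily_defaults_map : List (Int × Int × Int)) (out : List (Int × Int)) : Decidable (Spec_sum_bread_totals_py orders_map daily_defaults_map out) := by unfold Spec_sum_bread_totals_py; infer_instance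

-- ===== CLAIM (what is proved, stated in full; the proofs are below) =====
def Claim_equal_sum_bread_totals_py : Prop := ∀ (orders_map : List (Int × Int × Int)) (daily_defaults_map : List (Int × Int × Int)), Dom_sum_bread_totals_py orders_map daily_defaults_map → Pre_sum_bread_totals_py orders_map daily_defaults_map → Spec_sum_bread_totals_py orders_map daily_defaults_map (sum_bread_totals_py orders_map daily_defaults_map)

-- ===== LEMMAS AND PROOFS =====


theorem pv_pair_beq (a b c d : Int) : ((a,b) == (c,d)) = (c == a && d == b) := by
  show (a == c && b == d) = _
  rw [BEq.comm, @BEq.comm _ _ _ b]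

theorem pv_contains_any (l : List (Int×Int×Int)) (t : Int×Int×Int) :
    (l.map (fun o => (o.1,o.2.1))).contains (t.1,t.2.1) = l.any (fun o => o.1 == t.1 && o.2.1 == t.2.1) := by
  induction l with
  | nil => rfl
  | cons x xs ih => simp only [List.map_cons, List.contains_cons, List.any_cons, ← ih, pv_pair_beq]

theorem pv_foldl_add_nodup {α : Type} [BEq α] [LawfulBEq α] (l : List α) (s : List α) (hl : l.Nodup) :
    l.foldl PySem.Set.add s = s ++ l.filter (fun x => !s.contains x) := by
  induction l generalizing s with
  | nil => simp
  | cons x l ih =>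
    rcases List.nodup_cons.mp hl with ⟨hx, hl'⟩
    simp only [List.foldl_cons, List.filter_cons]
    by_cases h : x ∈ s
    · rw [show PySem.Set.add s x = s from by simp [PySem.Set.add, h]]
      rw [ih _ hl']
      simp [h]
    · rw [show PySem.Set.add s x = s ++ [x] from by simp [PySem.Set.add, h]]
      rw [ih _ hl']
      have hf : l.filter (fun y => !(s ++ [x]).contains y) = l.filter (fun y => !s.contains y) := by
        apply List.filter_congr
        intro y hy
        have hne : y ≠ x := fun e => hx (e ▸ hy)
        simp [hne]
      rw [hf]
      simp [h, List.append_assoc]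

-- dict built from pairs with duplicate-free keys: its items are exactly the pairs
theorem pv_items_ofList (ps : List ((Int × Int) × Int)) (h : (ps.map (fun p => p.1)).Nodup) :
    (PySem.Dict.ofList ps).items = ps := by
  show (ps.foldl (fun d p => d.insert p.1 p.2) PySem.Dict.empty).items = ps
  rw [PySem.Dict.items_foldl_insert_fresh ps (fun p => p.1) (fun p => p.2) PySem.Dict.empty (by simp) h]
  simp [PySem.Dict.empty]

theorem pv_keys_ofList (ps : List ((Int × Int) × Int)) (h : (ps.map (fun p => p.1)).Nodup) :
    (PySem.Dict.ofList ps).keys = ps.map (fun p => p.1) := by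
  rw [PySem.Dict.keys, pv_items_ofList ps h]

theorem pv_main (omap dmap : List (Int × Int × Int))
    (h1 : (omap.map (fun t => (t.1, t.2.1))).Nodup)
    (h2 : (dmap.map (fun t => (t.1, t.2.1))).Nodup) :
    sum_bread_totals_py omap dmap = sum_bread_totals_py_alt omap dmap := by
  have hk1 : ((omap.map (fun t => ((t.1, t.2.1), t.2.2))).map (fun p => p.1)).Nodup := by
    rw [List.map_map]; exact h1
  have hk2 : ((dmap.map (fun t => ((t.1, t.2.1), t.2.2))).map (fun p => p.1)).Nodup := by
    rw [List.map_map]; exact h2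
  simp only [sum_bread_totals_py, sum_bread_totals_py_alt]
  set om : PySem.Dict (Int×Int) Int := PySem.Dict.ofList (omap.map (fun t => ((t.1, t.2.1), t.2.2))) with hom
  set dm : PySem.Dict (Int×Int) Int := PySem.Dict.ofList (dmap.map (fun t => ((t.1, t.2.1), t.2.2))) with hdm
  have homkeys : om.keys = omap.map (fun t => (t.1, t.2.1)) := by
    rw [hom, pv_keys_ofList _ hk1, List.map_map]; rfl
  have hdmkeys : dm.keys = dmap.map (fun t => (t.1, t.2.1)) := by
    rw [hdm, pv_keys_ofList _ hk2, List.map_map]; rfl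
  have homnodup : om.keys.Nodup := by rw [homkeys]; exact h1
  have hdmnodup : dm.keys.Nodup := by rw [hdmkeys]; exact h2
  have hgetD_om : ∀ t ∈ omap, ∀ d0, om.getD (t.1, t.2.1) d0 = t.2.2 := by
    intro t ht d0
    apply PySem.Dict.getD_of_mem_items _ _ homnodup
    rw [hom, pv_items_ofList _ hk1]
    exact List.mem_map_of_mem ht
  have hgetD_dm : ∀ t ∈ dmap, ∀ d0, dm.getD (t.1, t.2.1) d0 = t.2.2 := by
    intro t ht d0
    apply PySem.Dict.getD_of_mem_items _ _ hdmnodup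
    rw [hdm, pv_items_ofList _ hk2]
    exact List.mem_map_of_mem ht
  have hall : PySem.Set.union (PySem.Set.ofList om.keys) dm.keys
      = omap.map (fun t => (t.1, t.2.1))
        ++ (dmap.map (fun t => (t.1, t.2.1))).filter
             (fun k => !(omap.map (fun t => (t.1, t.2.1))).contains k) := by
    have hofl : PySem.Set.ofList om.keys = omap.map (fun t => (t.1, t.2.1)) := by
      rw [PySem.Set.ofList_eq_foldl, homkeys, pv_foldl_add_nodup _ _ h1]
      simp
    show List.foldl PySem.Set.add (PySem.Set.ofList om.keys) dm.keys = _
    rw [hofl, hdmkeys, pv_foldl_add_nodup _ _ h2]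
  rw [hall, List.foldl_append]
  have hfold1 :
      List.foldl (fun (bt : PySem.Dict Int Int) (p : Int × Int) =>
          bt.insert p.2 (bt.getD p.2 0 + om.getD p (dm.getD p 0))) PySem.Dict.empty
        (omap.map (fun t => (t.1, t.2.1)))
      = List.foldl (fun bt t => bt.insert t.2.1 (bt.getD t.2.1 0 + t.2.2)) PySem.Dict.empty omap := by
    rw [List.foldl_map]
    exact PySem.List.foldl_congr_mem' _ _ _ _ (fun t ht acc => by rw [hgetD_om t ht])
  rw [hfold1]
  congr 1
  set X := List.foldl (fun bt t => bt.insert t.2.1 (bt.getD t.2.1 0 + t.2.2)) PySem.Dict.empty omap with hX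
  rw [List.filter_map, List.foldl_map, List.foldl_filter]
  apply PySem.List.foldl_congr_mem'
  intro t ht acc
  simp only [Function.comp, pv_contains_any]
  cases hc : omap.any (fun o => o.1 == t.1 && o.2.1 == t.2.1) with
  | false =>
    simp only [Bool.not_false, Bool.false_eq_true, if_true, if_false]
    have hnm : om.contains (t.1, t.2.1) = false := by
      rw [← Bool.not_eq_true]
      intro hcon
      have hmem := (PySem.Dict.contains_iff_mem_keys om _).mp hcon
      rw [homkeys] at hmem
      rcases List.mem_map.mp hmem with ⟨o, ho, he⟩
      have : (omap.any (fun o => o.1 == t.1 && o.2.1 == t.2.1)) = true := by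
        refine List.any_eq_true.mpr ⟨o, ho, ?_⟩
        simp only [Prod.mk.injEq] at he
        simp [he.1, he.2]
      rw [hc] at this
      exact Bool.false_ne_true this
    rw [PySem.Dict.getD_of_not_contains om _ hnm, hgetD_dm t ht]
  | true =>
    simp

-- ===== VERDICT (by name: the statement is the Claim_ definition above) =====
theorem sum_bread_totals_py_spec : Claim_equal_sum_bread_totals_py := by
  intro om dm _ hpre
  exact pv_main om dm hpre.1 hpre.2
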